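-- pv_equiv track=rewrite | github.com/livanshu-minfy/pythonAssignment | tuples/tuple_solutions.py | group_by_department
-- ===== SOURCE A (Python) =====
-- def group_by_department(employees):
--     result = {}
--
--     for name, dept, salary in employees:
--         if dept not in result:
--             result[dept] = {"total_salary": 0, "count": 0, "names": []}
--
--         result[dept]["total_salary"] += salary
--         result[dept]["count"] += 1
--         result[dept]["names"].append(name)
--
--     final = {}
--     for dept, data in result.items():
--         avg_salary = data["total_salary"] // data["count"]
--         final[dept] = (avg_salary, data["names"])
--
--     return final
-- ===== SOURCE B (Python) =====
-- def group_by_department(employees):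
--     # Pass 1: group records only, no arithmetic.
--     groups = {}
--     for name, dept, salary in employees:
--         groups.setdefault(dept, []).append((name, salary))
--     # Pass 2: aggregate each group at once.
--     final = {}
--     for dept, recs in groups.items():
--         salaries = [s for _, s in recs]
--         names = [n for n, _ in recs]
--         final[dept] = (sum(salaries) // len(salaries), names)
--     return final
-- ===== Notes on version B (the rewrite author's own statement) =====
-- stated objective: simpler
-- what changed: B defers all aggregation to a second pass: the first pass only collects each department's (name, salary) records via setdefault, and the averages/name lists are computed per group afterwards, instead of A's incrementally maintained total/count/names record per department.
import Mathlib
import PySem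

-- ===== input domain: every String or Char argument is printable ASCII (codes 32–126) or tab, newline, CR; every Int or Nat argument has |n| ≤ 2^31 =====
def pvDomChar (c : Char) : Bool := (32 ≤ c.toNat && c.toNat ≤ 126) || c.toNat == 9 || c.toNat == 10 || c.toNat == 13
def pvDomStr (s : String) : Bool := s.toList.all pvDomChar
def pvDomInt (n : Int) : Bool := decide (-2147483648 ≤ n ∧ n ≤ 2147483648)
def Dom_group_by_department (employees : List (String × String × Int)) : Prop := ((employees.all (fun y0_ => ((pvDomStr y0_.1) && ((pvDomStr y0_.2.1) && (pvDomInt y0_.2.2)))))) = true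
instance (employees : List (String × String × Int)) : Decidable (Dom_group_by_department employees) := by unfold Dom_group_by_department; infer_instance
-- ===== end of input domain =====

-- B groups records first and aggregates per department in a second pass (simpler decomposition, same cost); return-value equivalence only (neither mutates its argument).

-- ===== PORT A =====
-- one employee of A's first loop: conditional default insert, then the three field updates of result[dept]
def pvStepA (d : PySem.Dict String (Int × Int × List String)) (e : String × String × Int) :
    PySem.Dict String (Int × Int × List String) :=
  let d1 := if d.contains e.2.1 then d else d.insert e.2.1 (0, 0, [])
  d1.modify e.2.1 (0, 0, []) (fun v => (v.1 + e.2.2, v.2.1 + 1, v.2.2 ++ [e.1]))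

def group_by_department (employees : List (String × String × Int)) : List (String × Int × List String) :=
  let result := employees.foldl pvStepA PySem.Dict.empty
  let final := result.items.foldl
    (fun fin p => fin.insert p.1 (PySem.Int.floordiv p.2.1 p.2.2.1, p.2.2.2))
    (PySem.Dict.empty : PySem.Dict String (Int × List String))
  final.items

-- ===== PORT B =====
-- one employee of B's first loop: groups.setdefault(dept, []).append((name, salary))
def pvStepB (d : PySem.Dict String (List (String × Int))) (e : String × String × Int) :
    PySem.Dict String (List (String × Int)) :=
  d.modify e.2.1 [] (fun rs => rs ++ [(e.1, e.2.2)])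

def group_by_department_alt (employees : List (String × String × Int)) : List (String × Int × List String) :=
  let groups := employees.foldl pvStepB PySem.Dict.empty
  let final := groups.items.foldl
    (fun fin p =>
      fin.insert p.1 (PySem.Int.floordiv ((p.2.map (·.2)).sum) ((p.2.length : Int)), p.2.map (·.1)))
    (PySem.Dict.empty : PySem.Dict String (Int × List String))
  final.items

-- ===== PRECONDITION & SPEC =====
def Spec_group_by_department (employees : List (String × String × Int)) (out : List (String × Int × List String)) : Prop := out = group_by_department_alt employees
instance (employees : List (String × String × Int)) (out : List (String × Int × List String)) : Decidable (Spec_group_by_department employees out) := by unfold Spec_group_by_department; infer_instance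

-- ===== CLAIM (what is proved, stated in full; the proofs are below) =====
def Claim_equal_group_by_department : Prop := ∀ (employees : List (String × String × Int)), Dom_group_by_department employees → Spec_group_by_department employees (group_by_department employees)

-- ===== LEMMAS AND PROOFS =====

theorem pvStepA_getD (d : PySem.Dict String (Int × Int × List String)) (e : String × String × Int) (c : String) :
    (pvStepA d e).getD c (0, 0, []) =
      if c = e.2.1 then
        ((d.getD e.2.1 (0, 0, [])).1 + e.2.2, (d.getD e.2.1 (0, 0, [])).2.1 + 1,
          (d.getD e.2.1 (0, 0, [])).2.2 ++ [e.1])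
      else d.getD c (0, 0, []) := by
  unfold pvStepA
  by_cases hc : d.contains e.2.1
  · simp [hc, PySem.Dict.getD_modify]
  · simp only [Bool.not_eq_true] at hc
    simp only [hc, Bool.false_eq_true, if_false, PySem.Dict.getD_modify,
      PySem.Dict.getD_insert, PySem.Dict.getD_of_not_contains d _ hc]
    split_ifs <;> rfl

theorem pvStepB_getD (d : PySem.Dict String (List (String × Int))) (e : String × String × Int) (c : String) :
    (pvStepB d e).getD c [] =
      if c = e.2.1 then d.getD e.2.1 [] ++ [(e.1, e.2.2)] else d.getD c [] := by
  unfold pvStepB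
  simp [PySem.Dict.getD_modify]

theorem pvStepA_keys (d : PySem.Dict String (Int × Int × List String)) (e : String × String × Int) :
    (pvStepA d e).keys = if d.contains e.2.1 then d.keys else d.keys ++ [e.2.1] := by
  unfold pvStepA
  by_cases hc : d.contains e.2.1
  · simp [hc, PySem.Dict.keys_modify, PySem.Dict.keys_insert_of_contains]
  · simp only [Bool.not_eq_true] at hc
    simp only [hc, Bool.false_eq_true, if_false]
    rw [PySem.Dict.keys_modify, PySem.Dict.keys_insert_of_contains _ _ (by simp),
      PySem.Dict.keys_insert_of_not_contains _ _ hc]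

theorem pvStepB_keys (d : PySem.Dict String (List (String × Int))) (e : String × String × Int) :
    (pvStepB d e).keys = if d.contains e.2.1 then d.keys else d.keys ++ [e.2.1] := by
  unfold pvStepB
  by_cases hc : d.contains e.2.1
  · simp [hc, PySem.Dict.keys_modify, PySem.Dict.keys_insert_of_contains]
  · simp only [Bool.not_eq_true] at hc
    rw [PySem.Dict.keys_modify]
    simp [hc, PySem.Dict.keys_insert_of_not_contains _ _ hc]

-- the two first-pass dicts always have the same key list
theorem pv_keys_AB (l : List (String × String × Int))
    (dA : PySem.Dict String (Int × Int × List String)) (dB : PySem.Dict String (List (String × Int)))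
    (h : dA.keys = dB.keys) :
    (l.foldl pvStepA dA).keys = (l.foldl pvStepB dB).keys := by
  induction l generalizing dA dB with
  | nil => simpa using h
  | cons e l ih =>
    simp only [List.foldl_cons]
    apply ih
    rw [pvStepA_keys, pvStepB_keys, PySem.Dict.contains_eq_decide_mem_keys,
      PySem.Dict.contains_eq_decide_mem_keys, h]

theorem pv_nodup_A (l : List (String × String × Int)) (d : PySem.Dict String (Int × Int × List String))
    (h : d.keys.Nodup) : (l.foldl pvStepA d).keys.Nodup := by
  induction l generalizing d with
  | nil => simpa using h
  | cons e l ih =>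
    simp only [List.foldl_cons]
    apply ih
    rw [pvStepA_keys]
    by_cases hc : d.contains e.2.1
    · simpa [hc] using h
    · simp only [Bool.not_eq_true] at hc
      have : e.2.1 ∉ d.keys := by
        rw [PySem.Dict.contains_eq_decide_mem_keys] at hc
        simpa using hc
      simp only [hc, Bool.false_eq_true, if_false, List.nodup_append, List.nodup_cons]
      exact ⟨h, ⟨by simp, List.nodup_nil⟩,
        fun a ha b hb => by simp at hb; exact fun hab => this ((hb ▸ hab : a = e.2.1) ▸ ha)⟩

-- the aggregated value of A's dict at any key, in terms of the filtered input
theorem pv_A_getD (l : List (String × String × Int)) (d : PySem.Dict String (Int × Int × List String))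
    (c : String) :
    (l.foldl pvStepA d).getD c (0, 0, []) =
      ((d.getD c (0, 0, [])).1 + ((l.filter fun e => e.2.1 == c).map (·.2.2)).sum,
        (d.getD c (0, 0, [])).2.1 + ((l.filter fun e => e.2.1 == c).length : Int),
        (d.getD c (0, 0, [])).2.2 ++ (l.filter fun e => e.2.1 == c).map (·.1)) := by
  induction l generalizing d with
  | nil => simp
  | cons e l ih =>
    simp only [List.foldl_cons, ih, pvStepA_getD, List.filter_cons]
    by_cases h : e.2.1 = c
    · simp only [h, beq_self_eq_true, if_true, List.map_cons, List.sum_cons,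
        List.length_cons]
      refine Prod.ext (by ring) (Prod.ext (by push_cast; ring) (by simp))
    · have h' : ¬ c = e.2.1 := fun hh => h hh.symm
      simp [h, h']

-- the grouped records of B's dict at any key, in terms of the filtered input
theorem pv_B_getD (l : List (String × String × Int)) (d : PySem.Dict String (List (String × Int)))
    (c : String) :
    (l.foldl pvStepB d).getD c [] =
      d.getD c [] ++ (l.filter fun e => e.2.1 == c).map (fun e => (e.1, e.2.2)) := by
  induction l generalizing d with
  | nil => simp
  | cons e l ih =>
    simp only [List.foldl_cons, ih, pvStepB_getD, List.filter_cons]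
    by_cases h : e.2.1 = c
    · simp [h]
    · have h' : ¬ c = e.2.1 := fun hh => h hh.symm
      simp [h, h']

-- the second pass over a key-nodup dict just maps over its items
theorem pv_finalize {ν : Type} (d : PySem.Dict String ν) (g : String × ν → Int × List String)
    (h : d.keys.Nodup) :
    ((d.items.foldl (fun fin p => fin.insert p.1 (g p))
        (PySem.Dict.empty : PySem.Dict String (Int × List String))).items) =
      d.items.map (fun p => (p.1, g p)) := by
  have := PySem.Dict.items_foldl_insert_fresh d.items (fun p => p.1) (fun p => g p)
    (PySem.Dict.empty : PySem.Dict String (Int × List String))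
    (fun a _ => by simp [PySem.Dict.contains_empty]) (by simpa [PySem.Dict.keys] using h)
  simpa using this

-- ===== VERDICT (by name: the statement is the Claim_ definition above) =====
theorem group_by_department_spec : Claim_equal_group_by_department := by
  intro employees _
  unfold Spec_group_by_department group_by_department group_by_department_alt
  have hA : (employees.foldl pvStepA PySem.Dict.empty).keys.Nodup :=
    pv_nodup_A employees _ (by simp)
  have hk : (employees.foldl pvStepA PySem.Dict.empty).keys =
      (employees.foldl pvStepB PySem.Dict.empty).keys :=
    pv_keys_AB employees _ _ (by simp)
  have hB : (employees.foldl pvStepB PySem.Dict.empty).keys.Nodup := hk ▸ hA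
  rw [pv_finalize _ _ hA, pv_finalize _ _ hB,
    PySem.Dict.items_eq_map_keys _ hA (0, 0, []),
    PySem.Dict.items_eq_map_keys _ hB [], hk, List.map_map, List.map_map]
  apply List.map_congr_left
  intro c _
  simp only [Function.comp_apply, pv_A_getD, pv_B_getD]
  simp [List.map_map, Function.comp_def]
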